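-- pv_equiv track=rewrite | github.com/AngelosKoz/MSc_Scripts-Notes | Python_MSc/Set_41-60.py | f42
-- ===== SOURCE A (Python) =====
-- def f42(x):
--     n = 0
--     list_42 = []
--     for i in range(len(x)-2):
--         diff_42 = abs(x[i] - x[i+1]) + abs(x[i+1] - x[i+2])
--         list_42.append(diff_42)
--     lowest_diff = min(list_42)
--     index_42 = list_42.index(lowest_diff) + 1
--     return index_42
-- ===== SOURCE B (Python) =====
-- def f42(x):
--     best = None
--     best_i = 0
--     for i in range(len(x) - 2):
--         d = abs(x[i] - x[i+1]) + abs(x[i+1] - x[i+2])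
--         if best is None or d < best:
--             best, best_i = d, i
--     if best is None:
--         raise ValueError("min() arg is an empty sequence")
--     return best_i + 1
-- ===== Notes on version B (the rewrite author's own statement) =====
-- stated objective: simpler
-- what changed: Instead of materialising the list of triple-difference sums and then scanning it twice with min() and .index(), B tracks the best value and its index in a single fused pass (first minimum wins via strict <).
import Mathlib
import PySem

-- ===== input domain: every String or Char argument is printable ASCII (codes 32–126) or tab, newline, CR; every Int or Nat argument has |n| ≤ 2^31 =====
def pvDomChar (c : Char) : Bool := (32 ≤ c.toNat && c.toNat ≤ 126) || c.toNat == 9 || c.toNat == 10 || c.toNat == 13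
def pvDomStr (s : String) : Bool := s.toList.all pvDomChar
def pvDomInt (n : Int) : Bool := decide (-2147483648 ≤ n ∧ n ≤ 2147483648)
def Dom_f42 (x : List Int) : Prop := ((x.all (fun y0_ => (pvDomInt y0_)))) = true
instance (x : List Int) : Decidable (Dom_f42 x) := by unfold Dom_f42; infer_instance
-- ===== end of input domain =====

-- B replaces A's build-list + min() + .index() triple scan by one fused pass keeping (best value, best index).

-- ===== PORT A =====
def f42 (x : List Int) : Int :=
  let list42 := (PySem.List.pyRange 0 ((x.length : Int) - 2) 1).foldl
      (fun acc i =>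
        acc ++ [ |PySem.List.pyGetD x i 0 - PySem.List.pyGetD x (i + 1) 0| +
                 |PySem.List.pyGetD x (i + 1) 0 - PySem.List.pyGetD x (i + 2) 0| ]) []
  match PySem.List.min? list42 (fun v => v) with
  | none => 0   -- Python: min([]) raises ValueError here; excluded by Pre_f42
  | some m => ((PySem.List.index? list42 m).getD 0 : Int) + 1

-- ===== PORT B =====
def f42_alt (x : List Int) : Int :=
  let s := (PySem.List.pyRange 0 ((x.length : Int) - 2) 1).foldl
      (fun (s : Option Int × Int) i =>
        let d := |PySem.List.pyGetD x i 0 - PySem.List.pyGetD x (i + 1) 0| +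
                 |PySem.List.pyGetD x (i + 1) 0 - PySem.List.pyGetD x (i + 2) 0|
        match s.1 with
        | none => (some d, i)
        | some best => if d < best then (some d, i) else s)
      (none, 0)
  match s.1 with
  | none => 0   -- Python B raises ValueError here; excluded by Pre_f42
  | some _ => s.2 + 1

-- ===== PRECONDITION & SPEC =====
-- Pre_: fewer than 3 elements means no triple, so A's min([]) raises ValueError (B raises too).
def Pre_f42 (x : List Int) : Prop := 3 ≤ x.length
instance (x : List Int) : Decidable (Pre_f42 x) := by unfold Pre_f42; infer_instance
def pvWitness_f42 : List Int := [1, 5, 2, 4]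
def Spec_f42 (x : List Int) (out : Int) : Prop := out = f42_alt x
instance (x : List Int) (out : Int) : Decidable (Spec_f42 x out) := by unfold Spec_f42; infer_instance

-- ===== CLAIM (what is proved, stated in full; the proofs are below) =====
def Claim_equal_f42 : Prop := ∀ (x : List Int), Dom_f42 x → Pre_f42 x → Spec_f42 x (f42 x)

-- ===== LEMMAS AND PROOFS =====

-- the step of B's fold, abstracted over the per-index difference g
def bstep (g : Int → Int) (s : Option Int × Int) (i : Int) : Option Int × Int :=
  match s.1 with
  | none => (some (g i), i)
  | some best => if g i < best then (some (g i), i) else s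

-- invariant of B's single pass: after folding a nonempty index list l the state is
-- (some m, l[k]) where m is the minimum of l.map g and k the first position achieving it
lemma fold_inv (g : Int → Int) (l : List Int) (hl : l ≠ []) :
    ∃ (m : Int) (k : Nat) (hk : k < l.length),
      l.foldl (bstep g) (none, 0) = (some m, l[k]) ∧
      PySem.List.index? (l.map g) m = some k ∧
      (∀ y ∈ l.map g, m ≤ y) := by
  induction l using List.reverseRecOn with
  | nil => exact absurd rfl hl
  | append_singleton t a ih =>
    rcases eq_or_ne t [] with rfl | ht
    · refine ⟨g a, 0, by simp, ?_, ?_, ?_⟩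
      · simp [bstep]
      · simp
      · simp
    · obtain ⟨m, k, hk, hf, hidx, hmin⟩ := ih ht
      have hmem : m ∈ t.map g :=
        (PySem.List.index?_isSome_iff _ _).1 (by rw [hidx]; rfl)
      rw [List.foldl_append, hf]
      by_cases hlt : g a < m
      · refine ⟨g a, t.length, by simp, ?_, ?_, ?_⟩
        · simp only [List.foldl_cons, List.foldl_nil, bstep]
          rw [if_pos hlt]
          congr 1
          simp
        · have hnot : g a ∉ t.map g := fun h => absurd (hmin _ h) (by omega)
          rw [List.map_append, List.map_singleton,
            PySem.List.index?_append_singleton_self (t.map g) (g a) hnot]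
          simp
        · intro y hy
          rw [List.map_append] at hy
          rcases List.mem_append.1 hy with h | h
          · exact le_of_lt (lt_of_lt_of_le hlt (hmin _ h))
          · simp at h; omega
      · refine ⟨m, k, by simp; omega, ?_, ?_, ?_⟩
        · simp only [List.foldl_cons, List.foldl_nil, bstep]
          rw [if_neg hlt]
          congr 1
          rw [List.getElem_append_left hk]
        · rw [List.map_append, PySem.List.index?_append_of_mem _ hmem, hidx]
        · intro y hy
          rw [List.map_append] at hy
          rcases List.mem_append.1 hy with h | h
          · exact hmin _ h
          · simp at h; omega

theorem f42_equal (x : List Int) (hpre : Pre_f42 x) : f42 x = f42_alt x := by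
  set g : Int → Int := fun i =>
      |PySem.List.pyGetD x i 0 - PySem.List.pyGetD x (i + 1) 0| +
      |PySem.List.pyGetD x (i + 1) 0 - PySem.List.pyGetD x (i + 2) 0| with hg
  set l := PySem.List.pyRange 0 ((x.length : Int) - 2) 1 with hlr
  have hlen : l.length = x.length - 2 := by
    rw [hlr, PySem.List.length_pyRange_one]; omega
  have hl : l ≠ [] := by
    intro h
    have := hlen
    rw [h] at this
    simp at this
    unfold Pre_f42 at hpre
    omega
  obtain ⟨m, k, hk, hf, hidx, hmin⟩ := fold_inv g l hl
  -- B's side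
  have hB : f42_alt x = l[k] + 1 := by
    unfold f42_alt
    rw [← hlr]
    have hstep : (fun (s : Option Int × Int) i =>
        let d := |PySem.List.pyGetD x i 0 - PySem.List.pyGetD x (i + 1) 0| +
                 |PySem.List.pyGetD x (i + 1) 0 - PySem.List.pyGetD x (i + 2) 0|
        match s.1 with
        | none => (some d, i)
        | some best => if d < best then (some d, i) else s) = bstep g := by
      funext s i
      cases s with
      | mk b j => cases b <;> rfl
    rw [hstep, hf]
  -- A's side
  have hlist : l.foldl (fun acc i => acc ++ [g i]) [] = l.map g := by
    simpa using PySem.List.foldl_append_singleton_eq_map g l []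
  have hA : f42 x = (k : Int) + 1 := by
    unfold f42
    rw [← hlr]
    rw [show (fun (acc : List Int) i =>
        acc ++ [ |PySem.List.pyGetD x i 0 - PySem.List.pyGetD x (i + 1) 0| +
                 |PySem.List.pyGetD x (i + 1) 0 - PySem.List.pyGetD x (i + 2) 0| ]) =
        (fun acc i => acc ++ [g i]) from rfl, hlist]
    have hmem' : m ∈ l.map g :=
      (PySem.List.index?_isSome_iff _ _).1 (by rw [hidx]; rfl)
    show (match PySem.List.min? (l.map g) (fun v => v) with
      | none => (0 : Int)
      | some mm => ((PySem.List.index? (l.map g) mm).getD 0 : Int) + 1) = (k : Int) + 1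
    rcases h : PySem.List.min? (l.map g) (fun v => v) with _ | m'
    · rw [PySem.List.min?_eq_none_iff] at h
      exact absurd (h ▸ hmem') (by simp)
    · have hm'mem : m' ∈ l.map g := PySem.List.min?_mem h
      have hm'min : ∀ y ∈ l.map g, m' ≤ y := by
        intro y hy
        simpa using PySem.List.min?_isMin h y hy
      have : m = m' := le_antisymm (hmin _ hm'mem) (hm'min _ hmem')
      rw [← this]
      show ((PySem.List.index? (l.map g) m).getD 0 : Int) + 1 = (k : Int) + 1
      rw [hidx]
      simp
  have hkl : l[k] = (k : Int) := by
    simp [hlr, PySem.List.getElem_pyRange_one]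
  rw [hA, hB, hkl]

-- ===== VERDICT (by name: the statement is the Claim_ definition above) =====
theorem f42_spec : Claim_equal_f42 := by
  intro x _ hpre
  unfold Spec_f42
  exact f42_equal x hpre
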